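-- pv_equiv track=rewrite | github.com/cbtaylor/CPSC189 | Lecture01-04/lecture_01s.py | words_starting_with_vowel
-- ===== SOURCE A (Python) =====
-- def words_starting_with_vowel(low):
--     """
--     (listof Word) -> (listof Word)
--
--     Produces a list of words in low that start with a vowel
--
--     >>> words_starting_with_vowel([])
--     []
--
--     >>> words_starting_with_vowel(['abc', 'def', 'efg', 'fgh'])
--     ['abc', 'efg']
--
--     >>> words_starting_with_vowel(['bcc', 'vff'])
--     []
--
--     """
--     #return [] #stub
-- #    if low == []:
-- #        return ...
-- #    else:
-- #        return ... fn_for_word(low[0]) ...words_starting_with_vowel(low[1:])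
--
--     if low == []:
--         return []
--     else:
--        if starts_with_vowel(low[0]):
--            return [low[0]] + words_starting_with_vowel(low[1:])
--        else:
--            return words_starting_with_vowel(low[1:])
--
-- def starts_with_vowel(word):
--     """
--     Word -> bool
--
--     Produces True if word starts with a vowel
--
--     >>> starts_with_vowel('abc')
--     True
--
--     >>> starts_with_vowel('ebc')
--     True
--
--     >>> starts_with_vowel('ibc')
--     True
--
--     >>> starts_with_vowel('obc')
--     True
--
--     >>> starts_with_vowel('ubc')
--     True
--
--     >>> starts_with_vowel('hbc')
--     False
--     """
--     return word[0] in 'aeiou'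
-- ===== SOURCE B (Python) =====
-- def words_starting_with_vowel(low):
--     result = []
--     for w in low:
--         if w[0] in 'aeiou':
--             result.append(w)
--     return result
-- ===== Notes on version B (the rewrite author's own statement) =====
-- stated objective: faster
-- what changed: Replaced A's recursion on tail slices (building the result with list concatenation) by a single iterative loop that appends matching words to an accumulator.
import Mathlib
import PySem

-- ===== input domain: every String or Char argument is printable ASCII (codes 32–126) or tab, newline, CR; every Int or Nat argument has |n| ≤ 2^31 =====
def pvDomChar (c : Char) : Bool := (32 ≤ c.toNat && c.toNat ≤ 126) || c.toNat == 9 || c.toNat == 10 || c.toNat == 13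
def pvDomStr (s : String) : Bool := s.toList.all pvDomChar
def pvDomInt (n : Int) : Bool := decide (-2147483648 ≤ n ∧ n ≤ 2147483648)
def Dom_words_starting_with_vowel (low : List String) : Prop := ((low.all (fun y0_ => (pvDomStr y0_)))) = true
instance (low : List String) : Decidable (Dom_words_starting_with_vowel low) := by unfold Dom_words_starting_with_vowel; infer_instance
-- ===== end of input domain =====

-- B replaces A's recursion over tail slices with a single iterative accumulator loop (same helper test); equal on lists without empty strings.


-- ===== PORT A =====
-- starts_with_vowel: word[0] in 'aeiou'; pyGet? none = IndexError (empty word), excluded by Pre_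
def startsWithVowel (word : String) : Bool :=
  match PySem.Str.pyGet? word 0 with
  | some c => "aeiou".toList.contains c
  | none => false

def words_starting_with_vowel (low : List String) : List String :=
  match low with
  | [] => []
  | w :: rest =>
      if startsWithVowel w then [w] ++ words_starting_with_vowel rest
      else words_starting_with_vowel rest

-- ===== PORT B =====
def words_starting_with_vowel_alt (low : List String) : List String :=
  low.foldl (fun result w => if startsWithVowel w then result ++ [w] else result) []

-- ===== PRECONDITION & SPEC =====
-- Pre_ excludes lists containing an empty string: there word[0] raises IndexError in both A and B.
def Pre_words_starting_with_vowel (low : List String) : Prop := "" ∉ low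
instance (low : List String) : Decidable (Pre_words_starting_with_vowel low) := by unfold Pre_words_starting_with_vowel; infer_instance
def pvWitness_words_starting_with_vowel : List String := (["abc", "def", "efg"])

def Spec_words_starting_with_vowel (low : List String) (out : List String) : Prop := out = words_starting_with_vowel_alt low
instance (low : List String) (out : List String) : Decidable (Spec_words_starting_with_vowel low out) := by unfold Spec_words_starting_with_vowel; infer_instance

-- ===== CLAIM (what is proved, stated in full; the proofs are below) =====
def Claim_equal_words_starting_with_vowel : Prop := ∀ (low : List String), Dom_words_starting_with_vowel low → Pre_words_starting_with_vowel low → Spec_words_starting_with_vowel low (words_starting_with_vowel low)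

-- ===== LEMMAS AND PROOFS =====
lemma portA_eq_filter (low : List String) :
    words_starting_with_vowel low = low.filter startsWithVowel := by
  induction low with
  | nil => rfl
  | cons w rest ih => simp [words_starting_with_vowel, List.filter_cons, ih]

-- ===== VERDICT (by name: the statement is the Claim_ definition above) =====
theorem words_starting_with_vowel_spec : Claim_equal_words_starting_with_vowel := by
  intro low _ _
  unfold Spec_words_starting_with_vowel words_starting_with_vowel_alt
  rw [PySem.List.foldl_append_if_eq_filter, portA_eq_filter, List.nil_append]
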